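-- pv_equiv track=rewrite | github.com/johny-b/arc-oocr | functions.py | group_replace_with_first
-- ===== SOURCE A (Python) =====
-- def group_replace_with_first(lst: list) -> list:
--     if not lst:
--         return lst
--
--     result = []
--     current_group_start = 0
--
--     for i, num in enumerate(lst):
--         if num == 0 or i == len(lst) - 1:
--             group = lst[current_group_start:i + 1]
--             first_in_group = group[0]
--             result.extend([first_in_group] * (len(group) - 1))
--             if num == 0:
--                 result.append(0)
--                 current_group_start = i + 1
--             elif i == len(lst) - 1:
--                 result.append(first_in_group)
--
--     return result
-- ===== SOURCE B (Python) =====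
-- def group_replace_with_first(lst: list) -> list:
--     if not lst:
--         return lst
--     result = []
--     first = None
--     for num in lst:
--         if num == 0:
--             result.append(0)
--             first = None
--         else:
--             if first is None:
--                 first = num
--             result.append(first)
--     return result
-- ===== Notes on version B (the rewrite author's own statement) =====
-- stated objective: simpler
-- what changed: Replaced A's boundary-triggered slicing/extend (indices, a group-start cursor, lst[start:i+1] slices and replicated extends at each delimiter) with a single per-element pass that appends one output element per input element, carrying only the current group's first value; avoiding slice copies and list multiplication gives a constant-factor speedup.
import Mathlib
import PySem

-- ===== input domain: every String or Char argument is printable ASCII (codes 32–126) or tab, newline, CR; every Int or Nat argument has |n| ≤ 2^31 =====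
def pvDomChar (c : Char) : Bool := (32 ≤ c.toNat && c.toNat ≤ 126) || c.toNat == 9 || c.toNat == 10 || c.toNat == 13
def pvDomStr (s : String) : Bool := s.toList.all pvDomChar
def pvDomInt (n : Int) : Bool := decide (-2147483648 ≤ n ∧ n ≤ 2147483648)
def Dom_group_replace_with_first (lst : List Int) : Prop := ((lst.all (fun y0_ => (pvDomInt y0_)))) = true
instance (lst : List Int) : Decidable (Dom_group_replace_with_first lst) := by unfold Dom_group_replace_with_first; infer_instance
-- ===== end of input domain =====

-- B replaces A's slice-and-extend group building at zero/end boundaries with a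
-- per-element emission of the running group-first value (objective: simpler).

-- ===== PORT A =====
-- loop body of A's for-loop; state = (result, current_group_start), p = (i, num)
def pvStepA (lst : List Int) (s : List Int × Int) (p : Int × Int) : List Int × Int :=
  let result := s.1
  let start := s.2
  let i := p.1
  let num := p.2
  if num == 0 || i == (lst.length : Int) - 1 then
    let group := PySem.List.slice lst (some start) (some (i + 1))
    -- group[0]: group is never empty here (start ≤ i inside the loop), so headD never uses its default
    let first_in_group := group.headD 0
    let result := result ++ List.replicate (group.length - 1) first_in_group
    if num == 0 then (result ++ [0], i + 1)
    else if i == (lst.length : Int) - 1 then (result ++ [first_in_group], start)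
    else (result, start)
  else (result, start)

def group_replace_with_first (lst : List Int) : List Int :=
  if lst = [] then lst
  else ((PySem.List.enumerate lst 0).foldl (pvStepA lst) ([], 0)).1

-- ===== PORT B =====
-- loop body of B's for-loop; state = (result, first : Option Int)
def pvStepB (s : List Int × Option Int) (num : Int) : List Int × Option Int :=
  if num == 0 then (s.1 ++ [0], none)
  else
    let f := s.2.getD num
    (s.1 ++ [f], some f)

def group_replace_with_first_alt (lst : List Int) : List Int :=
  if lst = [] then lst
  else (lst.foldl pvStepB ([], none)).1

-- ===== PRECONDITION & SPEC =====
def Spec_group_replace_with_first (lst : List Int) (out : List Int) : Prop := out = group_replace_with_first_alt lst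
instance (lst : List Int) (out : List Int) : Decidable (Spec_group_replace_with_first lst out) := by unfold Spec_group_replace_with_first; infer_instance

-- ===== CLAIM (what is proved, stated in full; the proofs are below) =====
def Claim_equal_group_replace_with_first : Prop := ∀ (lst : List Int), Dom_group_replace_with_first lst → Spec_group_replace_with_first lst (group_replace_with_first lst)

-- ===== LEMMAS AND PROOFS =====

-- reference function: output of the whole pass given the current group-first value
def pvG : List Int → Option Int → List Int
  | [], _ => []
  | x :: xs, cur =>
    if x = 0 then 0 :: pvG xs none
    else (cur.getD x) :: pvG xs (some (cur.getD x))

-- A's delayed emission: output of the rest given the pending (unemitted) prefix of the current group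
def pvH : List Int → List Int → List Int
  | _, [] => []
  | pending, x :: rest =>
    if x = 0 then
      List.replicate pending.length ((pending ++ [0]).headD 0) ++ 0 :: pvH [] rest
    else if rest = [] then
      List.replicate pending.length ((pending ++ [x]).headD 0) ++ [(pending ++ [x]).headD 0]
    else pvH (pending ++ [x]) rest

theorem pvB_loop (xs : List Int) : ∀ (acc : List Int) (cur : Option Int),
    (xs.foldl pvStepB (acc, cur)).1 = acc ++ pvG xs cur := by
  induction xs with
  | nil => intro acc cur; simp [pvG]
  | cons x xs ih =>
    intro acc cur
    by_cases hx : x = 0 <;> simp [pvStepB, pvG, hx, ih]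

theorem pvHG (rest : List Int) : ∀ (pending : List Int),
    (pending = [] ∨ rest ≠ []) →
    pvH pending rest = List.replicate pending.length (pending.headD 0) ++ pvG rest pending.head? := by
  induction rest with
  | nil =>
    intro pending h
    rcases h with h | h
    · simp [h, pvH, pvG]
    · exact absurd rfl h
  | cons x rest ih =>
    intro pending _
    by_cases hx : x = 0
    · subst hx
      cases pending with
      | nil => simp [pvH, pvG, ih [] (Or.inl rfl)]
      | cons p ps => simp [pvH, pvG, ih [] (Or.inl rfl)]
    · by_cases hr : rest = []
      · subst hr
        cases pending with
        | nil => simp [pvH, pvG, hx]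
        | cons p ps => simp [pvH, pvG, hx, List.replicate_succ']
      · rw [pvH]
        simp only [hx, hr, if_false]
        rw [ih (pending ++ [x]) (Or.inr hr)]
        cases pending with
        | nil => simp [pvG, hx]
        | cons p ps =>
          simp [pvG, hx, List.replicate_succ', List.append_assoc]

theorem pvA_loop (lst : List Int) : ∀ (rest : List Int) (i j : Nat) (acc : List Int),
    lst.drop i = rest → j ≤ i → i ≤ lst.length →
    ((PySem.List.enumerate rest (i : Int)).foldl (pvStepA lst) (acc, (j : Int))).1
      = acc ++ pvH ((lst.drop j).take (i - j)) rest := by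
  intro rest
  induction rest with
  | nil => intro i j acc _ _ _; simp [PySem.List.enumerate, pvH]
  | cons x rest ih =>
    intro i j acc hdrop hji hlen
    have hilt : i < lst.length := by
      by_contra h
      have : lst.drop i = [] := List.drop_eq_nil_of_le (by omega)
      simp [this] at hdrop
    have hdrop' : lst.drop (i + 1) = rest := by
      rw [← List.drop_drop, hdrop]; rfl
    have hget : lst[i]? = some x := by
      have h0 : (lst.drop i)[0]? = some x := by rw [hdrop]; rfl
      rw [List.getElem?_drop] at h0
      simpa using h0
    -- pending and group shapes
    have hpend_take : (lst.drop j).take (i - j + 1) = (lst.drop j).take (i - j) ++ [x] := by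
      rw [List.take_add_one]
      have : (lst.drop j)[i - j]? = some x := by
        rw [List.getElem?_drop]
        have : j + (i - j) = i := by omega
        rw [this, hget]
      simp [this]
    have hslice : PySem.List.slice lst (some (j : Int)) (some ((i : Int) + 1))
        = (lst.drop j).take (i - j) ++ [x] := by
      have h1 : ((i : Int) + 1) = ((i + 1 : Nat) : Int) := by push_cast; ring
      rw [h1, PySem.List.slice_natCast]
      have h2 : i + 1 - j = i - j + 1 := by omega
      rw [h2, hpend_take]
    have hpendlen : ((lst.drop j).take (i - j)).length = i - j := by
      simp [List.length_take, List.length_drop]; omega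
    rw [PySem.List.enumerate_cons, List.foldl_cons]
    by_cases hx : x = 0
    · -- zero delimiter
      subst hx
      have hstep : pvStepA lst (acc, (j : Int)) ((i : Int), 0)
          = (acc ++ List.replicate (i - j) (((lst.drop j).take (i - j) ++ [(0 : Int)]).headD 0) ++ [0], (i : Int) + 1) := by
        simp only [pvStepA, hslice]
        have : ((0 : Int) == 0) = true := by decide
        simp only [this, Bool.true_or, if_true]
        simp [List.length_append, hpendlen, List.append_assoc]
      rw [hstep]
      have h1 : ((i : Int) + 1) = ((i + 1 : Nat) : Int) := by push_cast; ring
      rw [h1, ih (i + 1) (i + 1) _ hdrop' (le_refl _) (by omega)]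
      have : (lst.drop (i + 1)).take (i + 1 - (i + 1)) = [] := by simp
      rw [this]
      rw [pvH]
      simp only [List.append_assoc, List.singleton_append, hpendlen]
      simp
    · by_cases hr : rest = []
      · -- last element, nonzero
        subst hr
        have hlast : i = lst.length - 1 := by
          have := congrArg List.length hdrop'
          simp at this
          omega
        have hstep : pvStepA lst (acc, (j : Int)) ((i : Int), x)
            = (acc ++ (List.replicate (i - j) (((lst.drop j).take (i - j) ++ [x]).headD 0)
                ++ [((lst.drop j).take (i - j) ++ [x]).headD 0]), (j : Int)) := by
          simp only [pvStepA, hslice]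
          have hc : ((i : Int) == (lst.length : Int) - 1) = true := by
            simp only [beq_iff_eq]; omega
          have hnc : ((x : Int) == 0) = false := by simp [hx]
          simp only [hnc, hc, Bool.false_or, if_true]
          simp [List.length_append, hpendlen, List.append_assoc]
        rw [hstep]
        simp only [List.foldl_nil, PySem.List.enumerate_nil]
        rw [pvH]
        simp [hx, hpendlen]
      · -- middle of a group: state unchanged
        have hmid : i ≠ lst.length - 1 := by
          have := congrArg List.length hdrop'
          simp at this
          intro h
          have : rest.length = 0 := by omega
          exact hr (List.eq_nil_of_length_eq_zero this)
        have hstep : pvStepA lst (acc, (j : Int)) ((i : Int), x) = (acc, (j : Int)) := by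
          have hnc : ((x : Int) == 0) = false := by simp [hx]
          have hc : ((i : Int) == (lst.length : Int) - 1) = false := by
            simp only [beq_eq_false_iff_ne, ne_eq]
            intro h; apply hmid; omega
          simp [pvStepA, hnc, hc]
        rw [hstep]
        rw [show ((i : Int) + 1) = ((i + 1 : Nat) : Int) by push_cast; ring]
        rw [ih (i + 1) j _ hdrop' (by omega) (by omega)]
        have h2 : i + 1 - j = i - j + 1 := by omega
        rw [h2, hpend_take]
        conv_rhs => rw [pvH]
        simp [hx, hr]

-- ===== VERDICT (by name: the statement is the Claim_ definition above) =====
theorem group_replace_with_first_spec : Claim_equal_group_replace_with_first := by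
  intro lst _
  unfold Spec_group_replace_with_first
  unfold group_replace_with_first group_replace_with_first_alt
  by_cases h : lst = []
  · simp [h]
  · simp only [h, if_false]
    have hA := pvA_loop lst lst 0 0 [] (by simp) (le_refl _) (by simp)
    simp only [Nat.cast_zero, Nat.sub_zero, List.drop_zero, List.take_zero] at hA
    rw [hA, pvB_loop lst [] none]
    have := pvHG lst [] (Or.inl rfl)
    simp at this
    simp [this]
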